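-- pv_equiv track=rewrite | github.com/krniya/Algorithms | Python/Graphs/L_graphValidTree.py | validGraphTree
-- ===== SOURCE A (Python) =====
-- def validGraphTree(n, edges):
--     adj = {i:[] for i in range(n)}
--     for n1, n2 in edges:
--         adj[n1].append(n2)
--         adj[n2].append(n1)
--     visit = set()
--     def dfs(n,prev):
--         if n in visit:
--             return False
--         visit.add(n)
--         for i in adj[n]:
--             if i == prev:
--                 continue
--             if not dfs(i, n):
--                 return False
--         return True
--     return dfs(0,-1) and len(visit) == n
-- ===== SOURCE B (Python) =====
-- def validGraphTree(n, edges):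
--     # Iterative DFS with an explicit stack of (node, prev, pending-neighbors)
--     # frames instead of A's recursion; same adjacency dict, same traversal order.
--     adj = {i: [] for i in range(n)}
--     for a, b in edges:
--         adj[a].append(b)
--         adj[b].append(a)
--     visit = {0}
--     stack = [(0, -1, list(adj[0]))]
--     while stack:
--         node, prev, pending = stack[-1]
--         if not pending:
--             stack.pop()
--             continue
--         i = pending.pop(0)
--         if i == prev:
--             continue
--         if i in visit:
--             return False
--         visit.add(i)
--         stack.append((i, node, list(adj[i])))
--     return len(visit) == n
-- ===== Notes on version B (the rewrite author's own statement) =====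
-- stated objective: alternative
-- what changed: A's recursive dfs closure is replaced by an iterative DFS: a while loop over an explicit stack of (node, prev, pending-neighbours) frames with early return on a revisited node, instead of recursion with propagated boolean results.
import Mathlib
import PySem

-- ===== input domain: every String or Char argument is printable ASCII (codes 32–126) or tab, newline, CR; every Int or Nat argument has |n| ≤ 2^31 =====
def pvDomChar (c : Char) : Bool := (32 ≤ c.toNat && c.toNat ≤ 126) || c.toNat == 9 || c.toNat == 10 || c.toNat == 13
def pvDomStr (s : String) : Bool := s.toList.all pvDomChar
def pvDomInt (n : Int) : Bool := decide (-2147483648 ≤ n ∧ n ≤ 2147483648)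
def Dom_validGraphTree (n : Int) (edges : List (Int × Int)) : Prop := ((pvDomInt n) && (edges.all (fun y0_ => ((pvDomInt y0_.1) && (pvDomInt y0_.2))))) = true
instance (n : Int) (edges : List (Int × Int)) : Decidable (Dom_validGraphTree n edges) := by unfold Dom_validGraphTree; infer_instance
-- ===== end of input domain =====

-- B replaces A's recursive DFS by an iterative DFS over an explicit stack of
-- (node, prev, pending-neighbours) frames; same adjacency dict, same traversal order.

-- ===== PORT A =====
-- shared helper: the adjacency build `adj = {i:[] for i in range(n)}` plus the
-- edge loop with `adj[x].append(y)` (none = KeyError); this code is verbatim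
-- identical in Source A and Source B, so both ports share it.
def buildAdj0 (n : Int) : PySem.Dict Int (List Int) :=
  (PySem.List.pyRange 0 n 1).foldl (fun d i => d.insert i ([] : List Int)) PySem.Dict.empty

def addEdges (adj : PySem.Dict Int (List Int)) :
    List (Int × Int) → Option (PySem.Dict Int (List Int))
  | [] => some adj
  | (a, b) :: rest =>
    match adj.get? a with
    | none => none
    | some la =>
      let adj1 := adj.insert a (la ++ [b])
      match adj1.get? b with
      | none => none
      | some lb => addEdges (adj1.insert b (lb ++ [a])) rest

-- termination measure: number of keys of `adj` not yet visited
def pvUnvisited (adj : PySem.Dict Int (List Int)) (v : List Int) : Nat :=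
  (adj.keys.filter fun k => !decide (k ∈ v)).length

theorem pv_mem_keys {adj : PySem.Dict Int (List Int)} {u : Int} {lst : List Int}
    (h : adj.get? u = some lst) : u ∈ adj.keys := by
  by_contra hc
  rw [← PySem.Dict.get?_eq_none_iff_not_mem_keys] at hc
  simp [h] at hc

theorem pvSet_add_eq {v : List Int} {u : Int} (h : u ∉ v) :
    PySem.Set.add v u = v ++ [u] := by
  simp [PySem.Set.add, PySem.Set.contains, h]

theorem pvUnvisited_add_lt (adj : PySem.Dict Int (List Int)) (v : List Int) (u : Int)
    (hk : u ∈ adj.keys) (hv : u ∉ v) :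
    pvUnvisited adj (PySem.Set.add v u) < pvUnvisited adj v := by
  rw [pvSet_add_eq hv]
  unfold pvUnvisited
  have h1 : (adj.keys.filter fun k => !decide (k ∈ v ++ [u]))
      = (adj.keys.filter fun k => !decide (k ∈ v)).filter fun k => !decide (k = u) := by
    rw [List.filter_filter]
    apply List.filter_congr
    intro k _
    by_cases h2 : k = u <;> by_cases h3 : k ∈ v <;> simp_all
  rw [h1, List.length_filter_lt_length_iff_exists]
  exact ⟨u, by simp [List.mem_filter, hk, hv], by simp⟩

-- `dfs(n, prev)` / its `for i in adj[n]` loop; the visited set is threaded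
-- explicitly, the subtype proof only carries the termination measure bound.
mutual
def dfsA (adj : PySem.Dict Int (List Int)) (v : PySem.Set Int) (u p : Int) :
    Option (Bool × {w : PySem.Set Int // pvUnvisited adj w ≤ pvUnvisited adj v}) :=
  if hv : u ∈ v then some (false, ⟨v, le_rfl⟩)
  else
    match hget : adj.get? u with
    | none => none
    | some lst =>
      have hlt : pvUnvisited adj (PySem.Set.add v u) < pvUnvisited adj v :=
        pvUnvisited_add_lt adj v u (pv_mem_keys hget) hv
      match dfsLoopA adj (PySem.Set.add v u) lst u p with
      | none => none
      | some (b, ⟨w, hw⟩) => some (b, ⟨w, le_trans hw (le_of_lt hlt)⟩)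
termination_by (pvUnvisited adj v, 0)
decreasing_by
  exact Prod.Lex.left _ _ hlt

def dfsLoopA (adj : PySem.Dict Int (List Int)) (v : PySem.Set Int) (lst : List Int)
    (u p : Int) :
    Option (Bool × {w : PySem.Set Int // pvUnvisited adj w ≤ pvUnvisited adj v}) :=
  match lst with
  | [] => some (true, ⟨v, le_rfl⟩)
  | i :: rest =>
    if i = p then dfsLoopA adj v rest u p
    else
      match dfsA adj v i u with
      | none => none
      | some (false, w) => some (false, w)
      | some (true, ⟨w, hw⟩) =>
        match dfsLoopA adj w rest u p with
        | none => none
        | some (b, ⟨w2, hw2⟩) => some (b, ⟨w2, le_trans hw2 hw⟩)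
termination_by (pvUnvisited adj v, lst.length + 1)
decreasing_by
  · exact Prod.Lex.right _ (by simp)
  · exact Prod.Lex.right _ (by simp)
  · rcases lt_or_eq_of_le hw with h | h
    · exact Prod.Lex.left _ _ h
    · rw [h]; exact Prod.Lex.right _ (by simp)
end

def validGraphTree (n : Int) (edges : List (Int × Int)) : Bool :=
  match addEdges (buildAdj0 n) edges with
  | none => false
  | some adj =>
    match dfsA adj PySem.Set.empty 0 (-1) with
    | none => false
    | some (b, ⟨w, _⟩) => b && (((w.length : Int)) == n)

-- ===== PORT B =====
def pvStackWeight (S : List (Int × Int × List Int)) : Nat :=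
  (S.map fun f => f.2.2.length + 1).sum

-- the `while stack:` loop of Source B: frames are (node, prev, pending neighbours)
def machineB (adj : PySem.Dict Int (List Int)) (v : PySem.Set Int)
    (S : List (Int × Int × List Int)) : Option (Bool × PySem.Set Int) :=
  match S with
  | [] => some (true, v)
  | (node, prev, pending) :: rest =>
    match pending with
    | [] => machineB adj v rest
    | i :: pend =>
      if i = prev then machineB adj v ((node, prev, pend) :: rest)
      else if i ∈ v then some (false, v)
      else
        match hget : adj.get? i with
        | none => none
        | some li => machineB adj (PySem.Set.add v i) ((i, node, li) :: (node, prev, pend) :: rest)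
termination_by (pvUnvisited adj v, pvStackWeight S)
decreasing_by
  · exact Prod.Lex.right _ (by simp [pvStackWeight])
  · exact Prod.Lex.right _ (by simp [pvStackWeight])
  · exact Prod.Lex.left _ _ (pvUnvisited_add_lt adj v i (pv_mem_keys hget) (by assumption))

def validGraphTree_alt (n : Int) (edges : List (Int × Int)) : Bool :=
  match addEdges (buildAdj0 n) edges with
  | none => false
  | some adj =>
    match adj.get? 0 with
    | none => false
    | some l0 =>
      match machineB adj (PySem.Set.ofList [0]) [(0, -1, l0)] with
      | none => false
      | some (false, _) => false
      | some (true, w) => ((w.length : Int)) == n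

-- ===== PRECONDITION & SPEC =====
-- Pre_ excludes exactly the inputs on which the Python A raises KeyError:
-- n ≤ 0 (node 0 missing from adj) or an edge endpoint outside range(n).
def Pre_validGraphTree (n : Int) (edges : List (Int × Int)) : Prop :=
  0 < n ∧ ∀ e ∈ edges, 0 ≤ e.1 ∧ e.1 < n ∧ 0 ≤ e.2 ∧ e.2 < n
instance (n : Int) (edges : List (Int × Int)) : Decidable (Pre_validGraphTree n edges) := by
  unfold Pre_validGraphTree; infer_instance

def pvWitness_validGraphTree : Int × (List (Int × Int)) := (3, [(0, 1), (1, 2)])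

def Spec_validGraphTree (n : Int) (edges : List (Int × Int)) (out : Bool) : Prop := out = validGraphTree_alt n edges
instance (n : Int) (edges : List (Int × Int)) (out : Bool) : Decidable (Spec_validGraphTree n edges out) := by unfold Spec_validGraphTree; infer_instance

-- ===== CLAIM (what is proved, stated in full; the proofs are below) =====
def Claim_equal_validGraphTree : Prop := ∀ (n : Int) (edges : List (Int × Int)), Dom_validGraphTree n edges → Pre_validGraphTree n edges → Spec_validGraphTree n edges (validGraphTree n edges)

-- ===== LEMMAS AND PROOFS =====

-- drop the measure proofs from a dfsA/dfsLoopA result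
def pvVal {α : Type} {P : α → Prop} (r : Option (Bool × {w : α // P w})) :
    Option (Bool × α) :=
  r.map fun q => (q.1, q.2.val)

theorem dfsLoopA_nil (adj : PySem.Dict Int (List Int)) (v : PySem.Set Int) (u p : Int) :
    pvVal (dfsLoopA adj v [] u p) = some (true, v) := by
  rw [dfsLoopA]; rfl

theorem dfsLoopA_skip (adj : PySem.Dict Int (List Int)) (v : PySem.Set Int)
    (i : Int) (rest : List Int) (u p : Int) (hip : i = p) :
    pvVal (dfsLoopA adj v (i :: rest) u p) = pvVal (dfsLoopA adj v rest u p) := by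
  rw [dfsLoopA]; simp [hip]

theorem dfsLoopA_cons (adj : PySem.Dict Int (List Int)) (v : PySem.Set Int)
    (i : Int) (rest : List Int) (u p : Int) (hip : i ≠ p) :
    pvVal (dfsLoopA adj v (i :: rest) u p) =
      match pvVal (dfsA adj v i u) with
      | none => none
      | some (false, w) => some (false, w)
      | some (true, w) => pvVal (dfsLoopA adj w rest u p) := by
  rw [dfsLoopA]
  simp only [hip, if_false]
  rcases hd : dfsA adj v i u with _ | ⟨b, w, hw⟩
  · rfl
  · cases b
    · rfl
    · rcases hdl : dfsLoopA adj w rest u p with _ | ⟨b2, w2, hw2⟩ <;> simp [pvVal, hdl]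

theorem dfsA_visited (adj : PySem.Dict Int (List Int)) (v : PySem.Set Int) (u p : Int)
    (h : u ∈ v) : pvVal (dfsA adj v u p) = some (false, v) := by
  rw [dfsA]; simp [h, pvVal]

theorem dfsA_unvisited (adj : PySem.Dict Int (List Int)) (v : PySem.Set Int) (u p : Int)
    (hv : u ∉ v) :
    pvVal (dfsA adj v u p) =
      match adj.get? u with
      | none => none
      | some lst => pvVal (dfsLoopA adj (PySem.Set.add v u) lst u p) := by
  rw [dfsA]
  simp only [dif_neg hv]
  split
  next heq => rw [heq]; rfl
  next lst heq =>
    conv_rhs => rw [heq]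
    rcases hdl : dfsLoopA adj (PySem.Set.add v u) lst u p with _ | ⟨b, w, hw⟩ <;>
      simp [pvVal, hdl]

theorem machineB_nil (adj : PySem.Dict Int (List Int)) (v : PySem.Set Int) :
    machineB adj v [] = some (true, v) := by
  rw [machineB]

theorem machineB_pop (adj : PySem.Dict Int (List Int)) (v : PySem.Set Int)
    (a b : Int) (S : List (Int × Int × List Int)) :
    machineB adj v ((a, b, ([] : List Int)) :: S) = machineB adj v S := by
  rw [machineB]

theorem machineB_skip (adj : PySem.Dict Int (List Int)) (v : PySem.Set Int)
    (a p i : Int) (pend : List Int) (S : List (Int × Int × List Int)) (hip : i = p) :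
    machineB adj v ((a, p, i :: pend) :: S) = machineB adj v ((a, p, pend) :: S) := by
  rw [machineB]; simp [hip]

theorem machineB_found (adj : PySem.Dict Int (List Int)) (v : PySem.Set Int)
    (a p i : Int) (pend : List Int) (S : List (Int × Int × List Int))
    (hip : i ≠ p) (hiv : i ∈ v) :
    machineB adj v ((a, p, i :: pend) :: S) = some (false, v) := by
  rw [machineB]; simp [hip, hiv]

theorem machineB_deadkey (adj : PySem.Dict Int (List Int)) (v : PySem.Set Int)
    (a p i : Int) (pend : List Int) (S : List (Int × Int × List Int))
    (hip : i ≠ p) (hiv : i ∉ v) (hget : adj.get? i = none) :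
    machineB adj v ((a, p, i :: pend) :: S) = none := by
  rw [machineB]; simp only [if_neg hip, if_neg hiv]; split <;> simp_all

theorem machineB_push (adj : PySem.Dict Int (List Int)) (v : PySem.Set Int)
    (a p i : Int) (pend li : List Int) (S : List (Int × Int × List Int))
    (hip : i ≠ p) (hiv : i ∉ v) (hget : adj.get? i = some li) :
    machineB adj v ((a, p, i :: pend) :: S) =
      machineB adj (PySem.Set.add v i) ((i, a, li) :: (a, p, pend) :: S) := by
  rw [machineB]; simp only [if_neg hip, if_neg hiv]; split <;> simp_all

-- the simulation: the stack machine run from one frame computes the recursive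
-- dfs loop of that frame, then continues with the rest of the stack
theorem pvSim (adj : PySem.Dict Int (List Int)) :
    ∀ (B : Nat) (pend : List Int) (v : PySem.Set Int), pvUnvisited adj v ≤ B →
    ∀ (u p : Int) (S : List (Int × Int × List Int)),
    machineB adj v ((u, p, pend) :: S) =
      match pvVal (dfsLoopA adj v pend u p) with
      | none => none
      | some (false, w) => some (false, w)
      | some (true, w) => machineB adj w S := by
  intro B
  induction B using Nat.strong_induction_on with
  | _ B IH =>
    intro pend
    induction pend with
    | nil =>
      intro v hv u p S
      rw [machineB_pop, dfsLoopA_nil]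
    | cons i rest ih =>
      intro v hv u p S
      by_cases hip : i = p
      · rw [machineB_skip adj v u p i rest S hip, dfsLoopA_skip adj v i rest u p hip]
        exact ih v hv u p S
      · by_cases hiv : i ∈ v
        · rw [machineB_found adj v u p i rest S hip hiv, dfsLoopA_cons adj v i rest u p hip,
            dfsA_visited adj v i u hiv]
        · rcases hget : adj.get? i with _ | li
          · rw [machineB_deadkey adj v u p i rest S hip hiv hget,
              dfsLoopA_cons adj v i rest u p hip, dfsA_unvisited adj v i u hiv, hget]
          · have hlt : pvUnvisited adj (PySem.Set.add v i) < pvUnvisited adj v :=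
              pvUnvisited_add_lt adj v i (pv_mem_keys hget) hiv
            rw [machineB_push adj v u p i rest li S hip hiv hget,
              dfsLoopA_cons adj v i rest u p hip, dfsA_unvisited adj v i u hiv, hget]
            have hB : pvUnvisited adj (PySem.Set.add v i) ≤ B - 1 := by omega
            have hBlt : B - 1 < B := by omega
            rw [IH (B - 1) hBlt li (PySem.Set.add v i) hB i u ((u, p, rest) :: S)]
            dsimp only
            rcases hdl : pvVal (dfsLoopA adj (PySem.Set.add v i) li i u) with _ | ⟨b, w⟩
            · rfl
            · cases b
              · rfl
              · -- continue with the parent frame on the smaller visited bound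
                have hw : pvUnvisited adj w ≤ B := by
                  rcases hdl' : dfsLoopA adj (PySem.Set.add v i) li i u with _ | ⟨b', w', hw'⟩ <;>
                    rw [hdl'] at hdl <;> simp [pvVal] at hdl
                  obtain ⟨hb', hw2⟩ := hdl
                  subst hw2
                  omega
                exact ih w hw u p S

-- express port A's final dispatch through pvVal
theorem portA_val (n : Int) (adj : PySem.Dict Int (List Int)) :
    (match dfsA adj PySem.Set.empty 0 (-1) with
      | none => false
      | some (b, ⟨w, _⟩) => b && (((w.length : Int)) == n)) =
    (match pvVal (dfsA adj PySem.Set.empty 0 (-1)) with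
      | none => false
      | some (b, w) => b && (((w.length : Int)) == n)) := by
  rcases hd : dfsA adj PySem.Set.empty 0 (-1) with _ | ⟨b, w, hw⟩ <;> simp [pvVal]

-- ===== VERDICT (by name: the statement is the Claim_ definition above) =====
theorem validGraphTree_spec : Claim_equal_validGraphTree := by
  intro n edges _ _
  unfold Spec_validGraphTree validGraphTree validGraphTree_alt
  rcases hadj : addEdges (buildAdj0 n) edges with _ | adj
  · rfl
  · dsimp only
    rw [portA_val n adj]
    have hempty : (0 : Int) ∉ (PySem.Set.empty : PySem.Set Int) := by
      simp [PySem.Set.empty]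
    rw [dfsA_unvisited adj PySem.Set.empty 0 (-1) hempty]
    rcases hget : adj.get? 0 with _ | l0
    · rfl
    · have hofl : (PySem.Set.ofList [0] : PySem.Set Int) = PySem.Set.add PySem.Set.empty 0 := rfl
      rw [hofl]
      dsimp only
      rw [pvSim adj (pvUnvisited adj (PySem.Set.add PySem.Set.empty 0)) l0
        (PySem.Set.add PySem.Set.empty 0) le_rfl 0 (-1) []]
      rcases hdl : pvVal (dfsLoopA adj (PySem.Set.add PySem.Set.empty 0) l0 0 (-1)) with _ | ⟨b, w⟩
      · rfl
      · cases b
        · rfl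
        · dsimp only
          rw [machineB_nil]
          simp
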